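-- pv_equiv track=rewrite | github.com/gseokj/Problem-Solving | SWEA/D2/2005. 파스칼의 삼각형/파스칼의 삼각형.py | dp_test
-- ===== SOURCE A (Python) =====
-- def dp_test(n):
--     dp = [[0]*11 for i in range(11)]
--     dp[0][0] = 1
--     dp[1][0] = 1
--     dp[1][1] = 1
--     for i in range(2, 11):
--         for j in range(0,i+1):
--             if j==0 :
--                 dp[i][j] = 1
--             else :
--                 dp[i][j] = dp[i-1][j-1] + dp[i-1][j]
--     return dp[:n]
-- ===== SOURCE B (Python) =====
-- def dp_test(n):
--     rows = []
--     for i in range(11):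
--         row, c = [], 1
--         for j in range(11):
--             if j <= i:
--                 row.append(c)
--                 c = c * (i - j) // (j + 1)
--             else:
--                 row.append(0)
--         rows.append(row)
--     return rows[:n]
-- ===== Notes on version B (the rewrite author's own statement) =====
-- stated objective: alternative
-- what changed: Each row is computed independently with the multiplicative closed-form binomial recurrence C(i,j+1)=C(i,j)*(i-j)//(j+1) instead of the two-dimensional additive DP reading the previous row, and the zero-padded 11x11 table plus the final [:n] slice are kept.
import Mathlib
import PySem

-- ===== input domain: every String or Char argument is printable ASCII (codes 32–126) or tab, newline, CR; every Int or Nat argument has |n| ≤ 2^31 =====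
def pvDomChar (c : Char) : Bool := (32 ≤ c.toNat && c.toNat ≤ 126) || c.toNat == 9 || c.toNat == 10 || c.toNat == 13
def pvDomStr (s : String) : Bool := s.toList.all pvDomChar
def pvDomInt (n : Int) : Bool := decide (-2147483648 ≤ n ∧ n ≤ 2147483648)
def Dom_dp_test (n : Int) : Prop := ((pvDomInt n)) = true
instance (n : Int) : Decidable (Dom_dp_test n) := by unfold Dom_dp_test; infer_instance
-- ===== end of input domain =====

-- B replaces the additive two-row DP with an independent per-row multiplicative
-- closed-form binomial computation (objective: alternative; same output, same cost).

-- ===== PORT A =====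
-- dp[i][j] = v  (indices here are the loop's nonnegative in-range ints)
def pvSet2 (dp : List (List Int)) (i j : Int) (v : Int) : List (List Int) :=
  PySem.List.pySetD dp i (PySem.List.pySetD (PySem.List.pyGetD dp i []) j v)

-- dp[i][j]
def pvGet2 (dp : List (List Int)) (i j : Int) : Int :=
  PySem.List.pyGetD (PySem.List.pyGetD dp i []) j 0

-- the table A builds (n only enters via the final slice)
def pvTableA : List (List Int) :=
  -- dp = [[0]*11 for i in range(11)]; dp[0][0]=1; dp[1][0]=1; dp[1][1]=1
  let dp := List.replicate 11 (List.replicate 11 (0 : Int))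
  let dp := pvSet2 dp 0 0 1
  let dp := pvSet2 dp 1 0 1
  let dp := pvSet2 dp 1 1 1
  -- for i in range(2,11): for j in range(0,i+1): …
  let dp := (PySem.List.pyRange 2 11 1).foldl (fun dp i =>
    (PySem.List.pyRange 0 (i+1) 1).foldl (fun dp j =>
      if j == 0 then pvSet2 dp i j 1
      else pvSet2 dp i j (pvGet2 dp (i-1) (j-1) + pvGet2 dp (i-1) j)) dp) dp
  dp

def dp_test (n : Int) : List (List Int) :=
  -- return dp[:n]
  PySem.List.slice pvTableA none (some n)

-- ===== PORT B =====
-- the table B builds (rows of closed-form binomials, padded to width 11)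
def pvTableB : List (List Int) :=
  (PySem.List.pyRange 0 11 1).foldl (fun rows i =>
    let rc := (PySem.List.pyRange 0 11 1).foldl (fun (rc : List Int × Int) j =>
      let (row, c) := rc
      if j ≤ i then (row ++ [c], PySem.Int.floordiv (c * (i - j)) (j + 1))
      else (row ++ [(0 : Int)], c)) ([], 1)
    rows ++ [rc.1]) []

def dp_test_alt (n : Int) : List (List Int) :=
  -- return rows[:n]
  PySem.List.slice pvTableB none (some n)

-- ===== PRECONDITION & SPEC =====
def Spec_dp_test (n : Int) (out : List (List Int)) : Prop := out = dp_test_alt n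
instance (n : Int) (out : List (List Int)) : Decidable (Spec_dp_test n out) := by unfold Spec_dp_test; infer_instance

-- ===== CLAIM (what is proved, stated in full; the proofs are below) =====
def Claim_equal_dp_test : Prop := ∀ (n : Int), Dom_dp_test n → Spec_dp_test n (dp_test n)

-- ===== LEMMAS AND PROOFS =====
-- Both programs build a fixed 11×11 table and only then use n; the tables are equal.
set_option maxRecDepth 4096 in
theorem pv_tables_eq : pvTableA = pvTableB := by decide

-- ===== VERDICT (by name: the statement is the Claim_ definition above) =====
theorem dp_test_spec : Claim_equal_dp_test := by
  intro n _
  unfold Spec_dp_test dp_test dp_test_alt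
  rw [pv_tables_eq]
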